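-- pv_equiv track=rewrite | github.com/lukexodus/hanapsalita-data | scrapeUtils.py | reverseListOfLists
-- ===== SOURCE A (Python) =====
-- def reverseListOfLists(listOfLists):
--     maxColumnNum = findMaxColumnNumOfListOfLists(listOfLists)
--
--     # gets the length of every column
--     lengthsOfColumns = []
--     swappedDimensionsList = []
--     for columnNum in range(maxColumnNum):
--         swappedDimensionsList.append(list())
--         passedACell = False
--         rowNum = 0
--         numberOfCellsInTheColumn = 0
--         while True:
--             try:
--                 cellValue = listOfLists[rowNum][columnNum]
--                 swappedDimensionsList[columnNum].append(cellValue)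
--                 passedACell = True
--                 numberOfCellsInTheColumn += 1
--                 rowNum += 1
--             except IndexError:
--                 if not passedACell:
--                     rowNum += 1
--                     continue
--                 else:
--                     break
--         lengthsOfColumns.append(numberOfCellsInTheColumn)
--     return swappedDimensionsList
--
-- def findMaxColumnNumOfListOfLists(listOfLists):
--     maxColumnNum = 0
--     for sublist in listOfLists:
--         columnNum = len(sublist)
--         if columnNum > maxColumnNum:
--             maxColumnNum = columnNum
--
--     return maxColumnNum
-- ===== SOURCE B (Python) =====
-- def reverseListOfLists(listOfLists):
--     # Row-major single pass: a stack of still-active column indices (increasing)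
--     # replaces A's column-major probing with try/except.  A column becomes active
--     # when a row first reaches it and is popped for good by the first later row
--     # that falls short of it, so only cells that belong to the output are touched.
--     cols = []    # cols[c]: cells collected so far for column c
--     active = []  # increasing indices of columns whose run is still growing
--     for row in listOfLists:
--         n = len(row)
--         # columns this row does not reach are finished for good
--         while active and active[-1] >= n:
--             active.pop()
--         # columns first reached by this row come into existence now
--         while len(cols) < n:
--             active.append(len(cols))
--             cols.append([])
--         for c in active:
--             cols[c].append(row[c])
--     return cols
-- ===== Notes on version B (the rewrite author's own statement) =====
-- stated objective: faster
-- what changed: Column-major probing with try/except and a rescan from row 0 per column is replaced by a single row-major pass that maintains a stack of still-active column indices, popping a column the first time a row falls short of it, so only cells of the output are ever touched.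
import Mathlib
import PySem

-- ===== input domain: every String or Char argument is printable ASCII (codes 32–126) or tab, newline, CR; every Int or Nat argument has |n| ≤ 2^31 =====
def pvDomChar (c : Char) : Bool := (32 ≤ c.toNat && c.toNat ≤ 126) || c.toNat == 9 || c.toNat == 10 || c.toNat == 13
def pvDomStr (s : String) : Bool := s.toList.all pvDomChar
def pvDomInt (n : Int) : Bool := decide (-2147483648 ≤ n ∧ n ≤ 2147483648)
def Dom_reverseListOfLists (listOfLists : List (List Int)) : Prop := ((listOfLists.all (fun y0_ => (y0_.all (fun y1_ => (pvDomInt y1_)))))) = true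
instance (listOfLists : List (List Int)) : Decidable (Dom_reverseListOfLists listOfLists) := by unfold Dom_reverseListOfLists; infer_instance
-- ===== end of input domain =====

-- B replaces A's column-major probing (try/except, rescanning from row 0 for every
-- column) by one row-major pass over the rows that maintains a stack of still-active
-- column indices; a column is popped by the first row that falls short of it.
-- (A also builds a local list lengthsOfColumns it never returns; the port drops that
-- dead local, everything else is step for step.)

-- ===== PORT A =====
def findMaxColumnNumOfListOfLists (listOfLists : List (List Int)) : Nat :=
  listOfLists.foldl (fun maxColumnNum sublist =>
    if sublist.length > maxColumnNum then sublist.length else maxColumnNum) 0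

-- A's inner `while True` for one column: rowNum walks upward; a missing cell before the
-- first hit is skipped, a missing cell after the first hit ends the column.  For
-- columnNum < the max row length the loop runs at most listOfLists.length + 1 times,
-- so that fuel makes the same computation total.
def pvColLoopA (listOfLists : List (List Int)) (columnNum : Nat) :
    Nat → Nat → Bool → List Int → List Int
  | 0, _, _, acc => acc
  | fuel + 1, rowNum, passedACell, acc =>
    match (listOfLists[rowNum]?).bind (fun row => row[columnNum]?) with
    | some cellValue => pvColLoopA listOfLists columnNum fuel (rowNum + 1) true (acc ++ [cellValue])
    | none =>
      if passedACell then acc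
      else pvColLoopA listOfLists columnNum fuel (rowNum + 1) passedACell acc

def reverseListOfLists (listOfLists : List (List Int)) : List (List Int) :=
  let maxColumnNum := findMaxColumnNumOfListOfLists listOfLists
  (List.range maxColumnNum).map
    (fun columnNum => pvColLoopA listOfLists columnNum (listOfLists.length + 1) 0 false [])

-- ===== PORT B =====
-- `while active and active[-1] >= n: active.pop()` — the stack's top is the LAST list
-- element, so the loop is structural recursion on the reversed list.
def pvPopRev (n : Nat) : List Nat → List Nat
  | [] => []
  | c :: rest => if n ≤ c then pvPopRev n rest else c :: rest

-- `while len(cols) < n: active.append(len(cols)); cols.append([])`, k iterations left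
def pvPushB : Nat → List (List Int) × List Nat → List (List Int) × List Nat
  | 0, st => st
  | k + 1, (cols, active) => pvPushB k (cols ++ [[]], active ++ [cols.length])

-- one iteration of `for row in listOfLists`
def pvStepB (st : List (List Int) × List Nat) (row : List Int) : List (List Int) × List Nat :=
  let n := row.length
  let active1 := (pvPopRev n st.2.reverse).reverse
  let st2 := pvPushB (n - st.1.length) (st.1, active1)
  let cols3 := st2.2.foldl
    (fun cols c => cols.set c (cols.getD c [] ++ [row.getD c 0])) st2.1
  (cols3, st2.2)

def reverseListOfLists_alt (listOfLists : List (List Int)) : List (List Int) :=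
  (listOfLists.foldl pvStepB ([], [])).1

-- ===== PRECONDITION & SPEC =====
def Spec_reverseListOfLists (listOfLists : List (List Int)) (out : List (List Int)) : Prop := out = reverseListOfLists_alt listOfLists
instance (listOfLists : List (List Int)) (out : List (List Int)) : Decidable (Spec_reverseListOfLists listOfLists out) := by unfold Spec_reverseListOfLists; infer_instance

-- ===== CLAIM (what is proved, stated in full; the proofs are below) =====
def Claim_equal_reverseListOfLists : Prop := ∀ (listOfLists : List (List Int)), Dom_reverseListOfLists listOfLists → Spec_reverseListOfLists listOfLists (reverseListOfLists listOfLists)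

-- ===== LEMMAS AND PROOFS =====

-- row too short for column c
def pvP (c : Nat) (row : List Int) : Bool := decide (row.length ≤ c)

-- the value of column c: skip the leading too-short rows, then the contiguous run of
-- long-enough rows, reading cell c of each
def pvSpecCol (P : List (List Int)) (c : Nat) : List Int :=
  ((P.dropWhile (pvP c)).takeWhile (fun row => !pvP c row)).map (fun row => row.getD c 0)

-- column c's run has already ended within P
def pvDone (P : List (List Int)) (c : Nat) : Bool := (P.dropWhile (pvP c)).any (pvP c)

-- the state B's fold carries after consuming the rows P
def pvStB (P : List (List Int)) : List (List Int) × List Nat :=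
  ((List.range (findMaxColumnNumOfListOfLists P)).map (pvSpecCol P),
   (List.range (findMaxColumnNumOfListOfLists P)).filter (fun c => !pvDone P c))

lemma pvFm_step (m : Nat) (s : List Int) :
    (if s.length > m then s.length else m) = max m s.length := by
  split <;> omega

lemma pvFm_eq (P : List (List Int)) :
    findMaxColumnNumOfListOfLists P = P.foldl (fun m s => max m s.length) 0 := by
  unfold findMaxColumnNumOfListOfLists
  simp only [pvFm_step]

lemma pvG_foldl (t : List (List Int)) :
    ∀ a b : Nat, t.foldl (fun m s => max m s.length) (max a b)
      = max a (t.foldl (fun m s => max m s.length) b) := by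
  induction t with
  | nil => intro a b; rfl
  | cons r t ih =>
    intro a b
    simp only [List.foldl_cons, Nat.max_assoc]
    exact ih a (max b r.length)

lemma pvFm_cons (r : List Int) (t : List (List Int)) :
    findMaxColumnNumOfListOfLists (r :: t) = max r.length (findMaxColumnNumOfListOfLists t) := by
  rw [pvFm_eq, pvFm_eq, List.foldl_cons]
  have : max (0 : Nat) r.length = max r.length 0 := by omega
  rw [this, pvG_foldl]

lemma pvFm_append (P : List (List Int)) (r : List Int) :
    findMaxColumnNumOfListOfLists (P ++ [r]) = max (findMaxColumnNumOfListOfLists P) r.length := by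
  unfold findMaxColumnNumOfListOfLists
  simp [List.foldl_append, pvFm_step]

lemma pvFm_le (P : List (List Int)) : ∀ row ∈ P, row.length ≤ findMaxColumnNumOfListOfLists P := by
  induction P with
  | nil => simp
  | cons r t ih =>
    intro row hrow
    rw [pvFm_cons]
    rcases List.mem_cons.mp hrow with h | h
    · subst h; omega
    · have := ih row h; omega

lemma pvFm_exists (P : List (List Int)) (c : Nat)
    (h : c < findMaxColumnNumOfListOfLists P) : ∃ row ∈ P, c < row.length := by
  induction P with
  | nil => simp [findMaxColumnNumOfListOfLists] at h
  | cons r t ih =>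
    rw [pvFm_cons] at h
    by_cases hr : c < r.length
    · exact ⟨r, List.mem_cons_self, hr⟩
    · have : c < findMaxColumnNumOfListOfLists t := by omega
      obtain ⟨row, hm, hl⟩ := ih this
      exact ⟨row, List.mem_cons_of_mem _ hm, hl⟩

lemma pvDropWhile_ne_nil (P : List (List Int)) (c : Nat)
    (h : ∃ row ∈ P, c < row.length) : P.dropWhile (pvP c) ≠ [] := by
  intro hnil
  obtain ⟨row, hm, hl⟩ := h
  have := (List.dropWhile_eq_nil_iff).mp hnil row hm
  simp [pvP] at this
  omega

lemma pvTakeWhile_append_of_all {α : Type} (q : α → Bool) (l l' : List α)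
    (h : ∀ x ∈ l, q x = true) : (l ++ l').takeWhile q = l ++ l'.takeWhile q := by
  induction l with
  | nil => simp
  | cons a t ih =>
    have ha : q a = true := h a List.mem_cons_self
    simp [ha, ih (fun x hx => h x (List.mem_cons_of_mem _ hx))]

lemma pvTakeWhile_append_of_exists {α : Type} (q : α → Bool) (l l' : List α)
    (h : ∃ x ∈ l, q x = false) : (l ++ l').takeWhile q = l.takeWhile q := by
  induction l with
  | nil => simp at h
  | cons a t ih =>
    by_cases ha : q a = true
    · have : ∃ x ∈ t, q x = false := by
        obtain ⟨x, hx, hq⟩ := h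
        rcases List.mem_cons.mp hx with rfl | hx
        · rw [ha] at hq; cases hq
        · exact ⟨x, hx, hq⟩
      simp [ha, ih this]
    · have ha' : q a = false := by simpa using ha
      simp [ha']

lemma pvDone_snoc_lt (P : List (List Int)) (r : List Int) (c : Nat)
    (hc : c < findMaxColumnNumOfListOfLists P) :
    pvDone (P ++ [r]) c = (pvDone P c || decide (r.length ≤ c)) := by
  unfold pvDone
  rw [List.dropWhile_append]
  have hne := pvDropWhile_ne_nil P c (pvFm_exists P c hc)
  simp only [List.isEmpty_iff]
  rw [if_neg hne]
  simp [pvP]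

lemma pvDone_snoc_ge (P : List (List Int)) (r : List Int) (c : Nat)
    (hc : findMaxColumnNumOfListOfLists P ≤ c) :
    pvDone (P ++ [r]) c = false := by
  unfold pvDone
  have hnil : P.dropWhile (pvP c) = [] := by
    apply List.dropWhile_eq_nil_iff.mpr
    intro row hm
    have := pvFm_le P row hm
    simp [pvP]; omega
  rw [List.dropWhile_append, hnil]
  simp only [List.isEmpty_nil]
  by_cases h : pvP c r = true
  · simp [List.dropWhile, h]
  · have h' : pvP c r = false := by simpa using h
    simp [List.dropWhile, h']

lemma pvDone_all (P : List (List Int)) (c : Nat) (h : pvDone P c = false) :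
    ∀ x ∈ P.dropWhile (pvP c), pvP c x = false := by
  intro x hx
  have := List.any_eq_false.mp h x hx
  simpa using this

lemma pvSpec_snoc_lt (P : List (List Int)) (r : List Int) (c : Nat)
    (hc : c < findMaxColumnNumOfListOfLists P) :
    pvSpecCol (P ++ [r]) c
      = pvSpecCol P c ++ (if pvDone P c = false ∧ c < r.length then [r.getD c 0] else []) := by
  unfold pvSpecCol
  rw [List.dropWhile_append]
  have hne := pvDropWhile_ne_nil P c (pvFm_exists P c hc)
  simp only [List.isEmpty_iff]
  rw [if_neg hne]
  by_cases hd : pvDone P c = false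
  · have hall := pvDone_all P c hd
    rw [pvTakeWhile_append_of_all _ _ _ (fun x hx => by simp [hall x hx])]
    have hXself : (List.dropWhile (pvP c) P).takeWhile (fun row => !pvP c row)
        = List.dropWhile (pvP c) P :=
      List.takeWhile_eq_self_iff.mpr (fun x hx => by simp [hall x hx])
    by_cases hcr : c < r.length
    · have : pvP c r = false := by simp [pvP]; omega
      simp [hd, hcr, hXself, this, List.getD]
    · have : pvP c r = true := by simp [pvP]; omega
      simp [hd, hcr, hXself, this]
  · have hd' : pvDone P c = true := by simpa using hd
    have : ∃ x ∈ P.dropWhile (pvP c), (!pvP c x) = false := by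
      obtain ⟨x, hx, hq⟩ := List.any_eq_true.mp hd'
      exact ⟨x, hx, by simp [hq]⟩
    rw [pvTakeWhile_append_of_exists _ _ _ this]
    simp [hd']

lemma pvSpec_snoc_ge (P : List (List Int)) (r : List Int) (c : Nat)
    (hc : findMaxColumnNumOfListOfLists P ≤ c) :
    pvSpecCol (P ++ [r]) c = if c < r.length then [r.getD c 0] else [] := by
  unfold pvSpecCol
  have hnil : P.dropWhile (pvP c) = [] := by
    apply List.dropWhile_eq_nil_iff.mpr
    intro row hm
    have := pvFm_le P row hm
    simp [pvP]; omega
  rw [List.dropWhile_append, hnil]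
  simp only [List.isEmpty_nil]
  by_cases hcr : c < r.length
  · have : pvP c r = false := by simp [pvP]; omega
    simp [hcr, List.dropWhile, this]
  · have : pvP c r = true := by simp [pvP]; omega
    simp [hcr, List.dropWhile, this]

-- popping from a strictly-decreasing list is filtering
lemma pvPopRev_eq (n : Nat) (l : List Nat) (h : l.Pairwise (fun a b => b < a)) :
    pvPopRev n l = l.filter (fun c => decide (c < n)) := by
  induction l with
  | nil => rfl
  | cons a t ih =>
    rcases List.pairwise_cons.mp h with ⟨hall, ht⟩
    by_cases hna : n ≤ a
    · have : decide (a < n) = false := by simp; omega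
      simp [pvPopRev, hna, this, ih ht]
    · have ha : decide (a < n) = true := by simp; omega
      have : t.filter (fun c => decide (c < n)) = t :=
        List.filter_eq_self.mpr (fun x hx => by simp; have := hall x hx; omega)
      simp [pvPopRev, hna, ha, this]

lemma pvPop_spec (n : Nat) (l : List Nat) (h : l.Pairwise (· < ·)) :
    (pvPopRev n l.reverse).reverse = l.filter (fun c => decide (c < n)) := by
  rw [pvPopRev_eq n l.reverse (by simpa using List.pairwise_reverse.mpr h)]
  rw [← List.filter_reverse, List.reverse_reverse]

lemma pvPush_spec : ∀ (k : Nat) (cols : List (List Int)) (act : List Nat),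
    pvPushB k (cols, act)
      = (cols ++ List.replicate k [], act ++ List.range' cols.length k) := by
  intro k
  induction k with
  | zero => intro cols act; simp [pvPushB]
  | succ k ih =>
    intro cols act
    show pvPushB k (cols ++ [[]], act ++ [cols.length]) = _
    rw [ih]
    simp [List.range'_succ, List.replicate_succ]

lemma pvFoldSet_length (r : List Int) :
    ∀ (idxs : List Nat) (X : List (List Int)),
    (idxs.foldl (fun cols c => cols.set c (cols.getD c [] ++ [r.getD c 0])) X).length
      = X.length := by
  intro idxs
  induction idxs with
  | nil => intro X; rfl
  | cons i t ih => intro X; rw [List.foldl_cons, ih]; simp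

lemma pvFoldSet_getElem (r : List Int) :
    ∀ (idxs : List Nat) (X : List (List Int)), idxs.Nodup →
    (∀ i ∈ idxs, i < X.length) →
    ∀ (j : Nat) (hj : j < X.length),
    (idxs.foldl (fun cols c => cols.set c (cols.getD c [] ++ [r.getD c 0])) X)[j]'(by rw [pvFoldSet_length]; exact hj)
      = if j ∈ idxs then X[j] ++ [r.getD j 0] else X[j] := by
  intro idxs
  induction idxs with
  | nil => intro X _ _ j hj; simp
  | cons i t ih =>
    intro X hnd hb j hj
    rcases List.nodup_cons.mp hnd with ⟨hit, hnt⟩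
    have hiX : i < X.length := hb i List.mem_cons_self
    have hgetD : X.getD i [] = X[i] := List.getD_eq_getElem X [] hiX
    have hgetD' : X[i]?.getD [] = X[i] := by simp [List.getElem?_eq_getElem hiX]
    have hlen : (X.set i (X.getD i [] ++ [r.getD i 0])).length = X.length := by simp
    have hb' : ∀ x ∈ t, x < (X.set i (X.getD i [] ++ [r.getD i 0])).length := by
      intro x hx; rw [hlen]; exact hb x (List.mem_cons_of_mem _ hx)
    have := ih (X.set i (X.getD i [] ++ [r.getD i 0])) hnt hb' j (by rw [hlen]; exact hj)
    simp only [List.foldl_cons]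
    rw [this]
    by_cases hji : j = i
    · subst hji
      have hjt : j ∉ t := hit
      simp [hjt, List.getElem_set_self, hgetD']
    · have : (X.set i (X.getD i [] ++ [r.getD i 0]))[j]'(by rw [hlen]; exact hj) = X[j] := by
        have hij : i ≠ j := fun h => hji h.symm
        rw [List.getElem_set, if_neg hij]
      rw [this]
      by_cases hjt : j ∈ t
      · simp [hjt, List.mem_cons, hji]
      · have : j ∉ i :: t := by simp [hji, hjt]
        simp [hjt, this]

lemma pvMem_filterDone (P' : List (List Int)) (M' j : Nat) (hj : j < M') :
    (j ∈ (List.range M').filter (fun c => !pvDone P' c)) ↔ pvDone P' j = false := by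
  simp [List.mem_filter, List.mem_range, hj]

lemma pvStepB_snoc (P : List (List Int)) (r : List Int) :
    pvStepB (pvStB P) r = pvStB (P ++ [r]) := by
  have hM' : findMaxColumnNumOfListOfLists (P ++ [r])
      = max (findMaxColumnNumOfListOfLists P) r.length := pvFm_append P r
  -- abbreviations
  have hcolslen : ((List.range (findMaxColumnNumOfListOfLists P)).map (pvSpecCol P)).length
      = findMaxColumnNumOfListOfLists P := by simp
  -- (1) the pop loop filters the active stack to the columns the new row reaches
  have hpop : (pvPopRev r.length
        (((List.range (findMaxColumnNumOfListOfLists P)).filter (fun c => !pvDone P c)).reverse)).reverse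
      = (List.range (findMaxColumnNumOfListOfLists P)).filter
          (fun c => !pvDone P c && decide (c < r.length)) := by
    rw [pvPop_spec r.length _ (List.Pairwise.filter _ List.pairwise_lt_range)]
    rw [List.filter_filter]
    congr 1
    funext a
    exact Bool.and_comm _ _
  -- (2) the resulting active list is the filtered range of the new width
  have hact : (List.range (findMaxColumnNumOfListOfLists P)).filter
          (fun c => !pvDone P c && decide (c < r.length))
        ++ List.range' (findMaxColumnNumOfListOfLists P)
            (r.length - findMaxColumnNumOfListOfLists P)
      = (List.range (findMaxColumnNumOfListOfLists (P ++ [r]))).filter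
          (fun c => !pvDone (P ++ [r]) c) := by
    have hk : findMaxColumnNumOfListOfLists (P ++ [r])
        = findMaxColumnNumOfListOfLists P
          + (r.length - findMaxColumnNumOfListOfLists P) := by omega
    rw [hk]
    rw [show List.range (findMaxColumnNumOfListOfLists P
          + (r.length - findMaxColumnNumOfListOfLists P))
        = List.range (findMaxColumnNumOfListOfLists P)
          ++ List.range' (findMaxColumnNumOfListOfLists P)
              (r.length - findMaxColumnNumOfListOfLists P) by
      rw [List.range_eq_range', List.range_eq_range', ← List.range'_append]
      simp]
    rw [List.filter_append]
    congr 1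
    · apply List.filter_congr
      intro c hc
      have hcM : c < findMaxColumnNumOfListOfLists P := List.mem_range.mp hc
      have hnd : (!decide (r.length ≤ c)) = decide (c < r.length) := by
        by_cases h : c < r.length <;> simp [h] <;> omega
      rw [pvDone_snoc_lt P r c hcM, Bool.not_or, hnd]
    · symm
      apply List.filter_eq_self.mpr
      intro c hc
      have hcM : findMaxColumnNumOfListOfLists P ≤ c := by
        have := List.mem_range'_1.mp hc
        omega
      rw [pvDone_snoc_ge P r c hcM]
      rfl
  -- (3) the append loop writes exactly the new columns
  have hcols : ∀ (X : List (List Int)), X.length = findMaxColumnNumOfListOfLists (P ++ [r]) →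
      (∀ j (hj : j < X.length), X[j] = if _h : j < findMaxColumnNumOfListOfLists P then pvSpecCol P j else []) →
      (((List.range (findMaxColumnNumOfListOfLists (P ++ [r]))).filter
          (fun c => !pvDone (P ++ [r]) c)).foldl
        (fun cols c => cols.set c (cols.getD c [] ++ [r.getD c 0])) X)
      = (List.range (findMaxColumnNumOfListOfLists (P ++ [r]))).map (pvSpecCol (P ++ [r])) := by
    intro X hXlen hXget
    have hnd : ((List.range (findMaxColumnNumOfListOfLists (P ++ [r]))).filter
        (fun c => !pvDone (P ++ [r]) c)).Nodup := List.Nodup.filter _ List.nodup_range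
    have hbd : ∀ i ∈ (List.range (findMaxColumnNumOfListOfLists (P ++ [r]))).filter
        (fun c => !pvDone (P ++ [r]) c), i < X.length := by
      intro i hi
      rw [hXlen]
      exact List.mem_range.mp (List.mem_of_mem_filter hi)
    apply List.ext_getElem
    · rw [pvFoldSet_length]; simp [hXlen]
    · intro j h1 h2
      have hjlen : j < X.length := by
        have := h1; rwa [pvFoldSet_length] at this
      have hjM' : j < findMaxColumnNumOfListOfLists (P ++ [r]) := by
        rw [← hXlen]; exact hjlen
      rw [pvFoldSet_getElem r _ X hnd hbd j hjlen]
      rw [List.getElem_map, List.getElem_range]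
      by_cases hjM : j < findMaxColumnNumOfListOfLists P
      · have hXj : X[j]'hjlen = pvSpecCol P j := by rw [hXget j hjlen]; simp [hjM]
        by_cases hdone : pvDone (P ++ [r]) j = false
        · rw [if_pos ((pvMem_filterDone _ _ j hjM').mpr hdone)]
          have hsplit := pvDone_snoc_lt P r j hjM
          rw [hdone] at hsplit
          have hparts := Bool.or_eq_false_iff.mp hsplit.symm
          have hd1 : pvDone P j = false := hparts.1
          have hd2 : j < r.length := by
            have := hparts.2; simp at this; omega
          rw [pvSpec_snoc_lt P r j hjM, if_pos ⟨hd1, hd2⟩, hXj]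
        · have hdone' : pvDone (P ++ [r]) j = true := by simpa using hdone
          rw [if_neg (fun hmem => by
            have := (pvMem_filterDone _ _ j hjM').mp hmem
            rw [this] at hdone'; cases hdone')]
          rw [pvSpec_snoc_lt P r j hjM, hXj]
          have hsplit := pvDone_snoc_lt P r j hjM
          rw [hdone'] at hsplit
          have : ¬(pvDone P j = false ∧ j < r.length) := by
            intro hcontr
            rw [hcontr.1] at hsplit
            have : decide (r.length ≤ j) = true := by simpa using hsplit.symm
            simp at this
            omega
          rw [if_neg this, List.append_nil]
      · have hjge : findMaxColumnNumOfListOfLists P ≤ j := by omega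
        have hjn : j < r.length := by omega
        have hdone := pvDone_snoc_ge P r j hjge
        rw [if_pos ((pvMem_filterDone _ _ j hjM').mpr hdone)]
        have hXj : X[j]'hjlen = [] := by rw [hXget j hjlen]; simp [hjM]
        rw [hXj, pvSpec_snoc_ge P r j hjge, if_pos hjn]
        simp
  -- the padded column list handed to the append loop
  have hXlen : ((List.range (findMaxColumnNumOfListOfLists P)).map (pvSpecCol P)
      ++ List.replicate (r.length - findMaxColumnNumOfListOfLists P) ([] : List Int)).length
      = findMaxColumnNumOfListOfLists (P ++ [r]) := by
    simp; omega
  have hXget : ∀ j (hj : j < ((List.range (findMaxColumnNumOfListOfLists P)).map (pvSpecCol P)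
      ++ List.replicate (r.length - findMaxColumnNumOfListOfLists P) ([] : List Int)).length),
      ((List.range (findMaxColumnNumOfListOfLists P)).map (pvSpecCol P)
        ++ List.replicate (r.length - findMaxColumnNumOfListOfLists P) ([] : List Int))[j]
      = if _h : j < findMaxColumnNumOfListOfLists P then pvSpecCol P j else [] := by
    intro j hj
    by_cases hjM : j < findMaxColumnNumOfListOfLists P
    · rw [dif_pos hjM, List.getElem_append_left (by simpa using hjM)]
      simp
    · rw [dif_neg hjM, List.getElem_append_right (by simpa using hjM)]
      simp
  -- assemble the three steps
  unfold pvStepB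
  simp only [pvStB]
  rw [hpop, hcolslen, pvPush_spec, hcolslen, hact]
  simp only [Prod.mk.injEq]
  exact ⟨hcols _ hXlen hXget, trivial⟩

lemma pvFoldB (Q : List (List Int)) : ∀ (P : List (List Int)),
    Q.foldl pvStepB (pvStB P) = pvStB (P ++ Q) := by
  induction Q with
  | nil => intro P; simp
  | cons r t ih =>
    intro P
    rw [List.foldl_cons, pvStepB_snoc, ih]
    congr 1
    simp

lemma pvAlt_eq (L : List (List Int)) :
    reverseListOfLists_alt L
      = (List.range (findMaxColumnNumOfListOfLists L)).map (pvSpecCol L) := by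
  have h0 : (([], []) : List (List Int) × List Nat) = pvStB [] := by
    simp [pvStB, findMaxColumnNumOfListOfLists]
  unfold reverseListOfLists_alt
  rw [h0, pvFoldB L [], List.nil_append]
  simp [pvStB]

lemma pvLoopA_active (L : List (List Int)) (c : Nat) :
    ∀ (fuel rowNum : Nat) (acc : List Int), L.length ≤ rowNum + fuel →
    pvColLoopA L c fuel rowNum true acc
      = acc ++ ((L.drop rowNum).takeWhile (fun row => !pvP c row)).map (fun row => row.getD c 0) := by
  intro fuel
  induction fuel with
  | zero =>
    intro rowNum acc hle
    have : L.drop rowNum = [] := List.drop_eq_nil_of_le (by omega)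
    simp [pvColLoopA, this]
  | succ fuel ih =>
    intro rowNum acc hle
    by_cases hr : rowNum < L.length
    · have hdrop : L.drop rowNum = L[rowNum] :: L.drop (rowNum + 1) :=
        (List.getElem_cons_drop hr).symm
      have hget : L[rowNum]? = some L[rowNum] := List.getElem?_eq_getElem hr
      by_cases hcc : c < L[rowNum].length
      · have hcell : L[rowNum][c]? = some L[rowNum][c] := List.getElem?_eq_getElem hcc
        have hq : (!pvP c L[rowNum]) = true := by simp [pvP]; omega
        rw [show pvColLoopA L c (fuel + 1) rowNum true acc
              = pvColLoopA L c fuel (rowNum + 1) true (acc ++ [L[rowNum][c]]) by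
            simp [pvColLoopA, hget, hcell]]
        rw [ih (rowNum + 1) _ (by omega), hdrop]
        simp only [List.takeWhile_cons, hq, if_true, List.map_cons, List.getD, hcell,
          Option.getD_some, List.append_assoc, List.cons_append, List.nil_append]
      · have hcell : L[rowNum][c]? = none := by
          rw [List.getElem?_eq_none_iff]; omega
        have hq : (!pvP c L[rowNum]) = false := by simp [pvP]; omega
        rw [show pvColLoopA L c (fuel + 1) rowNum true acc = acc by
            simp [pvColLoopA, hget, hcell]]
        rw [hdrop]
        simp [hq]
    · have hget : L[rowNum]? = none := by rw [List.getElem?_eq_none_iff]; omega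
      have hdrop : L.drop rowNum = [] := List.drop_eq_nil_of_le (by omega)
      rw [show pvColLoopA L c (fuel + 1) rowNum true acc = acc by
          simp [pvColLoopA, hget]]
      simp [hdrop]

lemma pvLoopA_skip (L : List (List Int)) (c : Nat) :
    ∀ (fuel rowNum : Nat) (acc : List Int),
    (∃ row ∈ L.drop rowNum, c < row.length) →
    L.length + 1 ≤ rowNum + fuel →
    pvColLoopA L c fuel rowNum false acc
      = acc ++ (((L.drop rowNum).dropWhile (pvP c)).takeWhile (fun row => !pvP c row)).map
          (fun row => row.getD c 0) := by
  intro fuel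
  induction fuel with
  | zero =>
    intro rowNum acc hw hle
    have : L.drop rowNum = [] := List.drop_eq_nil_of_le (by omega)
    rw [this] at hw
    simp at hw
  | succ fuel ih =>
    intro rowNum acc hw hle
    by_cases hr : rowNum < L.length
    · have hdrop : L.drop rowNum = L[rowNum] :: L.drop (rowNum + 1) :=
        (List.getElem_cons_drop hr).symm
      have hget : L[rowNum]? = some L[rowNum] := List.getElem?_eq_getElem hr
      by_cases hcc : c < L[rowNum].length
      · have hcell : L[rowNum][c]? = some L[rowNum][c] := List.getElem?_eq_getElem hcc
        have hp : pvP c L[rowNum] = false := by simp [pvP]; omega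
        rw [show pvColLoopA L c (fuel + 1) rowNum false acc
              = pvColLoopA L c fuel (rowNum + 1) true (acc ++ [L[rowNum][c]]) by
            simp [pvColLoopA, hget, hcell]]
        rw [pvLoopA_active L c fuel (rowNum + 1) _ (by omega), hdrop]
        have hq : (!pvP c L[rowNum]) = true := by simp [pvP]; omega
        simp only [List.dropWhile_cons, hp, Bool.false_eq_true, if_false,
          List.takeWhile_cons, if_true, List.map_cons, List.getD, hcell,
          Option.getD_some, List.append_assoc, List.cons_append,
          List.nil_append, Bool.not_false]
      · have hcell : L[rowNum][c]? = none := by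
          rw [List.getElem?_eq_none_iff]; omega
        have hp : pvP c L[rowNum] = true := by simp [pvP]; omega
        rw [show pvColLoopA L c (fuel + 1) rowNum false acc
              = pvColLoopA L c fuel (rowNum + 1) false acc by
            simp [pvColLoopA, hget, hcell]]
        have hw' : ∃ row ∈ L.drop (rowNum + 1), c < row.length := by
          obtain ⟨row, hm, hlr⟩ := hw
          rw [hdrop] at hm
          rcases List.mem_cons.mp hm with rfl | hm
          · omega
          · exact ⟨row, hm, hlr⟩
        rw [ih (rowNum + 1) acc hw' (by omega), hdrop]
        simp only [List.dropWhile_cons, hp, if_true]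
    · exfalso
      have : L.drop rowNum = [] := List.drop_eq_nil_of_le (by omega)
      rw [this] at hw
      simp at hw

lemma pvA_eq (L : List (List Int)) :
    reverseListOfLists L
      = (List.range (findMaxColumnNumOfListOfLists L)).map (pvSpecCol L) := by
  unfold reverseListOfLists
  apply List.map_congr_left
  intro c hc
  rw [List.mem_range] at hc
  have hw : ∃ row ∈ L.drop 0, c < row.length := by
    simpa using pvFm_exists L c hc
  rw [pvLoopA_skip L c (L.length + 1) 0 [] hw (by omega)]
  simp [pvSpecCol]

-- ===== VERDICT (by name: the statement is the Claim_ definition above) =====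
theorem reverseListOfLists_spec : Claim_equal_reverseListOfLists := by
  intro L _
  show reverseListOfLists L = reverseListOfLists_alt L
  rw [pvA_eq, pvAlt_eq]
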